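-- pv_equiv track=rewrite | github.com/Eugene-SN/pdf-converter_v5 | document_processor/local_converter.py | _normalise_markdown
-- ===== SOURCE A (Python) =====
-- from typing import Any, Dict, List, Optional
--
-- def _normalise_markdown(markdown: str) -> str:
--     """Collapse long blank sections and trim trailing whitespace."""
--
--     lines: List[str] = []
--     previous_blank = False
--     for line in markdown.splitlines():
--         stripped = line.rstrip()
--         if not stripped:
--             if previous_blank:
--                 continue
--             previous_blank = True
--         else:
--             previous_blank = False
--         lines.append(stripped)
--     normalised = "\n".join(lines).strip()
--     return normalised + "\n" if normalised else ""
-- ===== SOURCE B (Python) =====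
-- def _normalise_markdown(markdown: str) -> str:
--     """Collapse long blank sections and trim trailing whitespace.
--
--     Paragraph-wise decomposition: gather maximal runs of non-blank
--     (rstripped) lines into paragraphs, join paragraphs with a single
--     blank line, then trim leading whitespace.
--     """
--     paragraphs = []
--     current = []
--     for line in markdown.splitlines():
--         line = line.rstrip()
--         if line:
--             current.append(line)
--         elif current:
--             paragraphs.append("\n".join(current))
--             current = []
--     if current:
--         paragraphs.append("\n".join(current))
--     body = "\n\n".join(paragraphs).lstrip()
--     return body + "\n" if body else ""
-- ===== Notes on version B (the rewrite author's own statement) =====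
-- stated objective: idiomatic
-- what changed: Replaces the stateful previous_blank dedup loop with a paragraph-wise decomposition: group maximal runs of non-blank rstripped lines into paragraphs, join paragraphs with one blank line, and lstrip the result; the final strip/trailing-newline convention is recovered without ever materialising the deduplicated blank lines.
import Mathlib
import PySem

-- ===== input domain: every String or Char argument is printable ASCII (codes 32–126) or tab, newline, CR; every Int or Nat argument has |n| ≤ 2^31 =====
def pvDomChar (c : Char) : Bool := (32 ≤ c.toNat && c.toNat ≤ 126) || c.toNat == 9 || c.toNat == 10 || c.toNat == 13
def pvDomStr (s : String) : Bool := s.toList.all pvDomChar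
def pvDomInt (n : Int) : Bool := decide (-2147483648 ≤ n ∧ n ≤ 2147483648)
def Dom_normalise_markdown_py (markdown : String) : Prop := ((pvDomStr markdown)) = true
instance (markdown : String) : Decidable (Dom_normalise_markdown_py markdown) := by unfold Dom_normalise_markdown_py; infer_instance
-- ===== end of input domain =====

-- B replaces A's stateful previous_blank dedup loop by a paragraph-grouping decomposition (idiomatic; same cost).

-- ===== PORT A =====
-- loop body of A's for-loop: state = (lines, previous_blank)
def pvStepA_str (st : List String × Bool) (line : String) : List String × Bool :=
  let stripped := PySem.Str.rstrip line
  if stripped = "" then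
    (if st.2 then st else (st.1 ++ [stripped], true))
  else (st.1 ++ [stripped], false)

def normalise_markdown_py (markdown : String) : String :=
  let st := (PySem.Str.splitlines markdown).foldl pvStepA_str ([], false)
  let normalised := PySem.Str.strip (PySem.Str.join "\n" st.1)
  if normalised ≠ "" then normalised ++ "\n" else ""

-- ===== PORT B =====
-- loop body of B's for-loop: state = (paragraphs, current)
def pvStepB_str (st : List String × List String) (line : String) : List String × List String :=
  let l := PySem.Str.rstrip line
  if l ≠ "" then (st.1, st.2 ++ [l])
  else if st.2 ≠ [] then (st.1 ++ [PySem.Str.join "\n" st.2], [])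
  else st

def normalise_markdown_py_alt (markdown : String) : String :=
  let st := (PySem.Str.splitlines markdown).foldl pvStepB_str ([], [])
  let paragraphs := if st.2 ≠ [] then st.1 ++ [PySem.Str.join "\n" st.2] else st.1
  let body := PySem.Str.lstrip (PySem.Str.join "\n\n" paragraphs)
  if body ≠ "" then body ++ "\n" else ""

-- ===== PRECONDITION & SPEC =====
def Spec_normalise_markdown_py (markdown : String) (out : String) : Prop := out = normalise_markdown_py_alt markdown
instance (markdown : String) (out : String) : Decidable (Spec_normalise_markdown_py markdown out) := by unfold Spec_normalise_markdown_py; infer_instance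

-- ===== CLAIM (what is proved, stated in full; the proofs are below) =====
def Claim_equal_normalise_markdown_py : Prop := ∀ (markdown : String), Dom_normalise_markdown_py markdown → Spec_normalise_markdown_py markdown (normalise_markdown_py markdown)

-- ===== LEMMAS AND PROOFS =====

-- char-level mirrors of the two loop bodies
def pvJN (ps : List (List Char)) : List Char := PySem.Chars.join ['\n'] ps
def pvJ2 (ps : List (List Char)) : List Char := PySem.Chars.join ['\n', '\n'] ps

def pvStepA (st : List (List Char) × Bool) (line : List Char) : List (List Char) × Bool :=
  let s := PySem.Chars.rstrip line
  if s = [] then (if st.2 then st else (st.1 ++ [s], true)) else (st.1 ++ [s], false)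

def pvStepB (st : List (List Char) × List (List Char)) (line : List Char) :
    List (List Char) × List (List Char) :=
  let l := PySem.Chars.rstrip line
  if l ≠ [] then (st.1, st.2 ++ [l])
  else if st.2 ≠ [] then (st.1 ++ [pvJN st.2], [])
  else st

def pvCloseB (st : List (List Char) × List (List Char)) : List (List Char) :=
  if st.2 ≠ [] then st.1 ++ [pvJN st.2] else st.1

-- "non-blank, already right-stripped"
def pvNB (s : List Char) : Prop := s ≠ [] ∧ PySem.Chars.rstrip s = s

def pvInv (a : List (List Char) × Bool) (b : List (List Char) × List (List Char)) : Prop :=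
  (∀ p ∈ b.1, pvNB p) ∧ (∀ l ∈ b.2, pvNB l) ∧
  ( (a.1 = [] ∧ a.2 = false ∧ b.1 = [] ∧ b.2 = [])
  ∨ (a.1 = [[]] ∧ a.2 = true ∧ b.1 = [] ∧ b.2 = [])
  ∨ (b.2 ≠ [] ∧ a.2 = false ∧ ∃ pre, (pre = ([] : List Char) ∨ pre = ['\n']) ∧
       pvJN a.1 = pre ++ pvJ2 (b.1 ++ [pvJN b.2]))
  ∨ (b.2 = [] ∧ b.1 ≠ [] ∧ a.2 = true ∧ ∃ pre, (pre = ([] : List Char) ∨ pre = ['\n']) ∧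
       pvJN a.1 = pre ++ pvJ2 b.1 ++ ['\n']) )


theorem pv_isspace_nl : PySem.Chars.isspace '\n' = true := by decide

theorem pv_dropWhile_idem {α : Type} (p : α → Bool) (l : List α) :
    List.dropWhile p (List.dropWhile p l) = List.dropWhile p l := by
  induction l with
  | nil => rfl
  | cons a t ih =>
    by_cases h : p a
    · simp [List.dropWhile_cons, h, ih]
    · simp [List.dropWhile_cons, h]

theorem pv_rstrip_concat (u : List Char) (c : Char) (h : PySem.Chars.isspace c = false) :
    PySem.Chars.rstrip (u ++ [c]) = u ++ [c] := by
  simp [PySem.Chars.rstrip, List.dropWhile_cons, h]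

theorem pv_NB_iff (s : List Char) :
    pvNB s ↔ ∃ u c, s = u ++ [c] ∧ PySem.Chars.isspace c = false := by
  constructor
  · rintro ⟨hne, hr⟩
    rcases List.eq_nil_or_concat s with rfl | ⟨u, c, rfl⟩
    · exact absurd rfl hne
    · simp only [List.concat_eq_append]
      refine ⟨u, c, rfl, ?_⟩
      cases hc : PySem.Chars.isspace c
      · rfl
      · exfalso
        have hdrop : PySem.Chars.rstrip (u ++ [c]) = PySem.Chars.rstrip u := by
          simp [PySem.Chars.rstrip, List.dropWhile_cons, hc]
        simp only [List.concat_eq_append] at hr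
        rw [hdrop] at hr
        have hlen : (PySem.Chars.rstrip u).length ≤ u.length := by
          simpa [PySem.Chars.rstrip] using List.length_dropWhile_le PySem.Chars.isspace u.reverse
        rw [hr] at hlen
        simp at hlen
  · rintro ⟨u, c, rfl, hc⟩
    exact ⟨by simp, pv_rstrip_concat u c hc⟩

theorem pv_rstrip_idem (s : List Char) :
    PySem.Chars.rstrip (PySem.Chars.rstrip s) = PySem.Chars.rstrip s := by
  simp [PySem.Chars.rstrip, pv_dropWhile_idem]

theorem pv_rstrip_append_right (x y : List Char) (h : pvNB y) :
    PySem.Chars.rstrip (x ++ y) = x ++ y := by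
  obtain ⟨u, c, rfl, hc⟩ := (pv_NB_iff y).mp h
  rw [← List.append_assoc]
  exact pv_rstrip_concat (x ++ u) c hc

theorem pv_rstrip_append_nl (s : List Char) :
    PySem.Chars.rstrip (s ++ ['\n']) = PySem.Chars.rstrip s := by
  simp [PySem.Chars.rstrip, List.dropWhile_cons, pv_isspace_nl]

theorem pv_lstrip_cons_nl (s : List Char) :
    PySem.Chars.lstrip ('\n' :: s) = PySem.Chars.lstrip s := by
  simp [PySem.Chars.lstrip, List.dropWhile_cons, pv_isspace_nl]

theorem pv_lstrip_concat_of_NB (u : List Char) (c : Char) (h : PySem.Chars.isspace c = false) :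
    ∃ v, PySem.Chars.lstrip (u ++ [c]) = v ++ [c] := by
  unfold PySem.Chars.lstrip
  rw [List.dropWhile_append]
  by_cases he : (List.dropWhile PySem.Chars.isspace u).isEmpty = true
  · refine ⟨[], ?_⟩
    simp [he, List.dropWhile_cons, h]
  · refine ⟨List.dropWhile PySem.Chars.isspace u, ?_⟩
    simp [he]

theorem pv_lstrip_ne_nil_of_NB (s : List Char) (h : pvNB s) :
    PySem.Chars.lstrip s ≠ [] := by
  obtain ⟨u, c, rfl, hc⟩ := (pv_NB_iff s).mp h
  obtain ⟨v, hv⟩ := pv_lstrip_concat_of_NB u c hc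
  simp [hv]

theorem pv_lstrip_append_of_NB (s w : List Char) (h : pvNB s) :
    PySem.Chars.lstrip (s ++ w) = PySem.Chars.lstrip s ++ w := by
  have hne := pv_lstrip_ne_nil_of_NB s h
  unfold PySem.Chars.lstrip at *
  rw [List.dropWhile_append]
  have : (List.dropWhile PySem.Chars.isspace s).isEmpty = false := by
    cases hh : (List.dropWhile PySem.Chars.isspace s).isEmpty
    · rfl
    · exact absurd (List.isEmpty_iff.mp hh) hne
  simp [this]

theorem pv_rstrip_lstrip_of_NB (s : List Char) (h : pvNB s) :
    PySem.Chars.rstrip (PySem.Chars.lstrip s) = PySem.Chars.lstrip s := by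
  obtain ⟨u, c, rfl, hc⟩ := (pv_NB_iff s).mp h
  obtain ⟨v, hv⟩ := pv_lstrip_concat_of_NB u c hc
  rw [hv]
  exact pv_rstrip_concat v c hc

theorem pv_NB_join (sep : List Char) (ps : List (List Char)) (hne : ps ≠ [])
    (h : ∀ p ∈ ps, pvNB p) : pvNB (PySem.Chars.join sep ps) := by
  induction ps with
  | nil => exact absurd rfl hne
  | cons p t ih =>
    cases t with
    | nil =>
      rw [PySem.Chars.join_singleton]
      exact h p (by simp)
    | cons q r =>
      rw [PySem.Chars.join_cons_cons]
      have hJ : pvNB (PySem.Chars.join sep (q :: r)) := by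
        refine ih (by simp) ?_
        intro x hx
        exact h x (by simp [hx])
      constructor
      · intro habs
        have : PySem.Chars.join sep (q :: r) = [] := by
          rcases List.append_eq_nil_iff.mp habs with ⟨-, h2⟩
          exact h2
        exact hJ.1 this
      · exact pv_rstrip_append_right (p ++ sep) _ hJ

theorem pv_join_snoc (sep : List Char) (xs : List (List Char)) (y : List Char) :
    PySem.Chars.join sep (xs ++ [y]) =
      if xs = [] then y else PySem.Chars.join sep xs ++ sep ++ y := by
  induction xs with
  | nil => simp [PySem.Chars.join_singleton]
  | cons a t ih =>
    cases t with
    | nil =>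
      simp [PySem.Chars.join_cons_cons, PySem.Chars.join_singleton]
    | cons b t' =>
      have h1 : (a :: b :: t') ++ [y] = a :: ((b :: t') ++ [y]) := by simp
      rw [h1]
      have h2 : (b :: t') ++ [y] = b :: (t' ++ [y]) := by simp
      have h3 : ∃ z zs, t' ++ [y] = z :: zs := by
        cases t' with
        | nil => exact ⟨y, [], rfl⟩
        | cons w ws => exact ⟨w, ws ++ [y], by simp⟩
      obtain ⟨z, zs, hz⟩ := h3
      rw [h2, hz, PySem.Chars.join_cons_cons, ← hz, ← h2, ih]
      simp [PySem.Chars.join_cons_cons]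

theorem pv_join_snoc_append (sep : List Char) (ps : List (List Char)) (y z : List Char) :
    PySem.Chars.join sep (ps ++ [y ++ z]) = PySem.Chars.join sep (ps ++ [y]) ++ z := by
  rw [pv_join_snoc, pv_join_snoc]
  by_cases h : ps = []
  · simp [h]
  · simp [h]
theorem pv_NB_mem_snoc (ps cur : List (List Char))
    (hbp : ∀ p ∈ ps, pvNB p) (hbc : ∀ l ∈ cur, pvNB l) (hc : cur ≠ []) :
    ∀ p ∈ ps ++ [pvJN cur], pvNB p := by
  intro p hp
  rcases List.mem_append.mp hp with hm | hm
  · exact hbp p hm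
  · have : p = pvJN cur := by simpa using hm
    subst this
    exact pv_NB_join _ cur hc hbc

theorem pv_acc_ne_nil (acc : List (List Char)) (pre X : List Char)
    (heq : pvJN acc = pre ++ X) (hX : X ≠ []) : acc ≠ [] := by
  intro hacc
  subst hacc
  have : pre ++ X = [] := by
    rw [← heq]
    simp [pvJN, PySem.Chars.join_nil]
  rcases List.append_eq_nil_iff.mp this with ⟨-, h2⟩
  exact hX h2

theorem pv_inv_step (a : List (List Char) × Bool) (b : List (List Char) × List (List Char))
    (line : List Char) (h : pvInv a b) : pvInv (pvStepA a line) (pvStepB b line) := by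
  obtain ⟨acc, flag⟩ := a
  obtain ⟨ps, cur⟩ := b
  obtain ⟨hbp, hbc, hcase⟩ := h
  simp only at hbp hbc hcase
  by_cases hl : PySem.Chars.rstrip line = []
  · -- the incoming line is blank after rstrip
    rcases hcase with ⟨h1, h2, h3, h4⟩ | ⟨h1, h2, h3, h4⟩ |
      ⟨h1, h2, pre, hpre, heq⟩ | ⟨h1, h2, h3, pre, hpre, heq⟩
    · subst h1; subst h2; subst h3; subst h4
      have hSA : pvStepA ([], false) line = ([([] : List Char)], true) := by
        simp [pvStepA, hl]
      have hSB : pvStepB ([], []) line = ([], []) := by simp [pvStepB, hl]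
      rw [hSA, hSB]
      exact ⟨by simp, by simp, Or.inr (Or.inl ⟨rfl, rfl, rfl, rfl⟩)⟩
    · subst h1; subst h2; subst h3; subst h4
      have hSA : pvStepA ([[]], true) line = ([[]], true) := by simp [pvStepA, hl]
      have hSB : pvStepB ([], []) line = ([], []) := by simp [pvStepB, hl]
      rw [hSA, hSB]
      exact ⟨by simp, by simp, Or.inr (Or.inl ⟨rfl, rfl, rfl, rfl⟩)⟩
    · -- open paragraph: A appends one blank, B closes the paragraph
      subst h2
      have hJcur : pvNB (pvJN cur) := pv_NB_join _ cur h1 hbc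
      have hX : pvNB (pvJ2 (ps ++ [pvJN cur])) :=
        pv_NB_join _ _ (by simp) (pv_NB_mem_snoc ps cur hbp hbc h1)
      have hacc : acc ≠ [] := pv_acc_ne_nil acc pre _ heq hX.1
      have hSA : pvStepA (acc, false) line = (acc ++ [([] : List Char)], true) := by
        simp [pvStepA, hl]
      have hSB : pvStepB (ps, cur) line = (ps ++ [pvJN cur], []) := by
        simp [pvStepB, hl, h1]
      rw [hSA, hSB]
      refine ⟨pv_NB_mem_snoc ps cur hbp hbc h1, by simp, ?_⟩
      refine Or.inr (Or.inr (Or.inr ⟨rfl, by simp, rfl, pre, hpre, ?_⟩))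
      have hJ : pvJN (acc ++ [([] : List Char)]) = pvJN acc ++ ['\n'] := by
        rw [pvJN, pv_join_snoc, if_neg hacc]
        simp [pvJN]
      simp [hJ, heq]
    · -- after a blank with closed paragraph: both sides skip
      subst h1; subst h3
      have hSA : pvStepA (acc, true) line = (acc, true) := by simp [pvStepA, hl]
      have hSB : pvStepB (ps, []) line = (ps, []) := by simp [pvStepB, hl]
      rw [hSA, hSB]
      exact ⟨hbp, by simp, Or.inr (Or.inr (Or.inr ⟨rfl, h2, rfl, pre, hpre, heq⟩))⟩
  · -- non-blank line: A appends it, B extends the current paragraph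
    have hNB : pvNB (PySem.Chars.rstrip line) := ⟨hl, pv_rstrip_idem line⟩
    have hSA : ∀ fl, pvStepA (acc, fl) line = (acc ++ [PySem.Chars.rstrip line], false) := by
      intro fl; simp [pvStepA, hl]
    have hSB : pvStepB (ps, cur) line = (ps, cur ++ [PySem.Chars.rstrip line]) := by
      simp [pvStepB, hl]
    have hbc' : ∀ x ∈ cur ++ [PySem.Chars.rstrip line], pvNB x := by
      intro x hx
      rcases List.mem_append.mp hx with hm | hm
      · exact hbc x hm
      · have : x = PySem.Chars.rstrip line := by simpa using hm
        subst this; exact hNB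
    rw [hSA, hSB]
    rcases hcase with ⟨h1, h2, h3, h4⟩ | ⟨h1, h2, h3, h4⟩ |
      ⟨h1, h2, pre, hpre, heq⟩ | ⟨h1, h2, h3, pre, hpre, heq⟩
    · subst h1; subst h3; subst h4
      refine ⟨by simp, by simpa using hbc', ?_⟩
      refine Or.inr (Or.inr (Or.inl ⟨by simp, rfl, [], by simp, ?_⟩))
      simp [pvJN, pvJ2, PySem.Chars.join_singleton]
    · subst h1; subst h3; subst h4
      refine ⟨by simp, by simpa using hbc', ?_⟩
      refine Or.inr (Or.inr (Or.inl ⟨by simp, rfl, ['\n'], by simp, ?_⟩))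
      have : pvJN ([[]] ++ [PySem.Chars.rstrip line]) =
          [] ++ ['\n'] ++ PySem.Chars.rstrip line := by
        rw [pvJN, pv_join_snoc, if_neg (by simp : ¬([([] : List Char)] = []))]
        simp [pvJN, PySem.Chars.join_singleton]
      rw [this]
      simp [pvJN, pvJ2, PySem.Chars.join_singleton]
    · -- open paragraph grows
      subst h2
      have hJcur : pvNB (pvJN cur) := pv_NB_join _ cur h1 hbc
      have hX : pvNB (pvJ2 (ps ++ [pvJN cur])) :=
        pv_NB_join _ _ (by simp) (pv_NB_mem_snoc ps cur hbp hbc h1)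
      have hacc : acc ≠ [] := pv_acc_ne_nil acc pre _ heq hX.1
      refine ⟨hbp, hbc', ?_⟩
      refine Or.inr (Or.inr (Or.inl ⟨by simp, rfl, pre, hpre, ?_⟩))
      have hA : pvJN (acc ++ [PySem.Chars.rstrip line]) =
          pvJN acc ++ ['\n'] ++ PySem.Chars.rstrip line := by
        rw [pvJN, pv_join_snoc, if_neg hacc]; simp [pvJN]
      have hC : pvJN (cur ++ [PySem.Chars.rstrip line]) =
          pvJN cur ++ (['\n'] ++ PySem.Chars.rstrip line) := by
        rw [pvJN, pv_join_snoc, if_neg h1]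
        simp [pvJN]
      rw [hA, hC, pvJ2, pv_join_snoc_append, heq]
      simp [pvJ2]
    · -- a new paragraph starts after a closed one
      subst h1; subst h3
      have hps : pvNB (pvJ2 ps) := pv_NB_join _ ps h2 hbp
      have hacc : acc ≠ [] :=
        pv_acc_ne_nil acc pre (pvJ2 ps ++ ['\n']) (by rw [heq]; simp) (by simp)
      refine ⟨hbp, by simpa using hNB, ?_⟩
      refine Or.inr (Or.inr (Or.inl ⟨by simp, rfl, pre, hpre, ?_⟩))
      have hA : pvJN (acc ++ [PySem.Chars.rstrip line]) =
          pvJN acc ++ ['\n'] ++ PySem.Chars.rstrip line := by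
        rw [pvJN, pv_join_snoc, if_neg hacc]; simp [pvJN]
      have hB : pvJ2 (ps ++ [pvJN [PySem.Chars.rstrip line]]) =
          pvJ2 ps ++ ['\n', '\n'] ++ PySem.Chars.rstrip line := by
        rw [pvJN, PySem.Chars.join_singleton, pvJ2, pv_join_snoc, if_neg h2]
        simp [pvJ2]
      show pvJN (acc ++ [PySem.Chars.rstrip line]) =
        pre ++ pvJ2 (ps ++ [pvJN [PySem.Chars.rstrip line]])
      rw [hA, heq, hB]
      simp

theorem pv_inv_fold (L : List (List Char)) (a : List (List Char) × Bool)
    (b : List (List Char) × List (List Char)) (h : pvInv a b) :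
    pvInv (L.foldl pvStepA a) (L.foldl pvStepB b) := by
  induction L generalizing a b with
  | nil => exact h
  | cons x t ih => exact ih _ _ (pv_inv_step _ _ _ h)

theorem pv_lstrip_pre (pre X : List Char) (hpre : pre = [] ∨ pre = ['\n']) :
    PySem.Chars.lstrip (pre ++ X) = PySem.Chars.lstrip X := by
  rcases hpre with rfl | rfl
  · simp
  · exact pv_lstrip_cons_nl X

theorem pv_inv_final (a : List (List Char) × Bool) (b : List (List Char) × List (List Char))
    (h : pvInv a b) :
    PySem.Chars.strip (pvJN a.1) = PySem.Chars.lstrip (pvJ2 (pvCloseB b)) := by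
  obtain ⟨acc, flag⟩ := a
  obtain ⟨ps, cur⟩ := b
  obtain ⟨hbp, hbc, hcase⟩ := h
  simp only at hbp hbc hcase ⊢
  rcases hcase with ⟨h1, h2, h3, h4⟩ | ⟨h1, h2, h3, h4⟩ |
    ⟨h1, h2, pre, hpre, heq⟩ | ⟨h1, h2, h3, pre, hpre, heq⟩
  · subst h1; subst h3; subst h4
    simp [pvCloseB, pvJN, pvJ2, PySem.Chars.join_nil, PySem.Chars.strip,
      PySem.Chars.lstrip, PySem.Chars.rstrip]
  · subst h1; subst h3; subst h4
    simp [pvCloseB, pvJN, pvJ2, PySem.Chars.join_nil, PySem.Chars.join_singleton,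
      PySem.Chars.strip, PySem.Chars.lstrip, PySem.Chars.rstrip]
  · -- an open paragraph at the end
    have hX : pvNB (pvJ2 (ps ++ [pvJN cur])) :=
      pv_NB_join _ _ (by simp) (pv_NB_mem_snoc ps cur hbp hbc h1)
    have hclose : pvCloseB (ps, cur) = ps ++ [pvJN cur] := by simp [pvCloseB, h1]
    rw [hclose, heq]
    unfold PySem.Chars.strip
    rw [pv_lstrip_pre _ _ hpre, pv_rstrip_lstrip_of_NB _ hX]
  · -- a trailing (collapsed) blank at the end
    subst h1; subst h3
    have hZ : pvNB (pvJ2 ps) := pv_NB_join _ ps h2 hbp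
    have hclose : pvCloseB (ps, []) = ps := by simp [pvCloseB]
    rw [hclose, heq]
    unfold PySem.Chars.strip
    have hassoc : pre ++ pvJ2 ps ++ ['\n'] = pre ++ (pvJ2 ps ++ ['\n']) := by simp
    rw [hassoc, pv_lstrip_pre _ _ hpre, pv_lstrip_append_of_NB _ _ hZ,
      pv_rstrip_append_nl, pv_rstrip_lstrip_of_NB _ hZ]

theorem pv_rstrip_empty_iff (x : String) :
    (PySem.Str.rstrip x = "") ↔ PySem.Chars.rstrip x.toList = [] := by
  constructor
  · intro h
    have := congrArg String.toList h
    rw [PySem.Str.toList_rstrip] at this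
    simpa using this
  · intro h
    apply String.toList_inj.mp
    rw [PySem.Str.toList_rstrip, h]
    rfl

theorem pv_stepA_bridge (st : List String × Bool) (x : String) :
    ((pvStepA_str st x).1.map String.toList, (pvStepA_str st x).2)
      = pvStepA (st.1.map String.toList, st.2) x.toList := by
  by_cases hx : PySem.Str.rstrip x = ""
  · have hc : PySem.Chars.rstrip x.toList = [] := (pv_rstrip_empty_iff x).mp hx
    cases hfl : st.2
    · simp [pvStepA_str, pvStepA, hx, hc, hfl]
    · simp [pvStepA_str, pvStepA, hx, hc, hfl]
  · have hc : ¬ PySem.Chars.rstrip x.toList = [] := fun h => hx ((pv_rstrip_empty_iff x).mpr h)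
    simp [pvStepA_str, pvStepA, hx, hc, PySem.Str.toList_rstrip]

theorem pv_foldA_bridge (L : List String) (acc : List String) (bl : Bool) :
    ((L.foldl pvStepA_str (acc, bl)).1.map String.toList, (L.foldl pvStepA_str (acc, bl)).2)
      = (L.map String.toList).foldl pvStepA (acc.map String.toList, bl) := by
  induction L generalizing acc bl with
  | nil => rfl
  | cons x t ih =>
    simp only [List.foldl_cons, List.map_cons]
    rw [← pv_stepA_bridge (acc, bl) x]
    simpa using ih (pvStepA_str (acc, bl) x).1 (pvStepA_str (acc, bl) x).2

theorem pv_stepB_bridge (st : List String × List String) (x : String) :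
    ((pvStepB_str st x).1.map String.toList, (pvStepB_str st x).2.map String.toList)
      = pvStepB (st.1.map String.toList, st.2.map String.toList) x.toList := by
  by_cases hx : PySem.Str.rstrip x = ""
  · have hc : PySem.Chars.rstrip x.toList = [] := (pv_rstrip_empty_iff x).mp hx
    by_cases h2 : st.2 = []
    · simp [pvStepB_str, pvStepB, hx, hc, h2]
    · have h2' : ¬ st.2.map String.toList = [] := by simpa using h2
      simp [pvStepB_str, pvStepB, hx, hc, h2, h2', PySem.Str.toList_join, pvJN]
  · have hc : ¬ PySem.Chars.rstrip x.toList = [] := fun h => hx ((pv_rstrip_empty_iff x).mpr h)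
    simp [pvStepB_str, pvStepB, hx, hc, PySem.Str.toList_rstrip]

theorem pv_foldB_bridge (L : List String) (ps cur : List String) :
    ((L.foldl pvStepB_str (ps, cur)).1.map String.toList,
     (L.foldl pvStepB_str (ps, cur)).2.map String.toList)
      = (L.map String.toList).foldl pvStepB (ps.map String.toList, cur.map String.toList) := by
  induction L generalizing ps cur with
  | nil => rfl
  | cons x t ih =>
    simp only [List.foldl_cons, List.map_cons]
    rw [← pv_stepB_bridge (ps, cur) x]
    simpa using ih (pvStepB_str (ps, cur) x).1 (pvStepB_str (ps, cur) x).2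

-- ===== VERDICT (by name: the statement is the Claim_ definition above) =====
theorem pv_main (md : String) : normalise_markdown_py md = normalise_markdown_py_alt md := by
  unfold normalise_markdown_py normalise_markdown_py_alt
  have hbridgeA := pv_foldA_bridge (PySem.Str.splitlines md) [] false
  have hbridgeB := pv_foldB_bridge (PySem.Str.splitlines md) [] []
  have hinv := pv_inv_fold ((PySem.Str.splitlines md).map String.toList) ([], false) ([], [])
    ⟨by simp, by simp, Or.inl ⟨rfl, rfl, rfl, rfl⟩⟩
  have hfin := pv_inv_final _ _ hinv
  set stA := (PySem.Str.splitlines md).foldl pvStepA_str ([], false) with hstA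
  set stB := (PySem.Str.splitlines md).foldl pvStepB_str ([], []) with hstB
  have hA1 : stA.1.map String.toList
      = ((PySem.Chars.splitlines md.toList).foldl pvStepA ([], false)).1 := by
    have := congrArg Prod.fst hbridgeA
    simpa using this
  have hB1 : stB.1.map String.toList
      = ((PySem.Chars.splitlines md.toList).foldl pvStepB ([], [])).1 := by
    have := congrArg Prod.fst hbridgeB
    simpa using this
  have hB2 : stB.2.map String.toList
      = ((PySem.Chars.splitlines md.toList).foldl pvStepB ([], [])).2 := by
    have := congrArg Prod.snd hbridgeB
    simpa using this
  simp only [PySem.Str.splitlines_map_toList] at hinv hfin hA1 hB1 hB2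
  have hkey : PySem.Str.strip (PySem.Str.join "\n" stA.1)
      = PySem.Str.lstrip (PySem.Str.join "\n\n"
          (if stB.2 ≠ [] then stB.1 ++ [PySem.Str.join "\n" stB.2] else stB.1)) := by
    apply String.toList_inj.mp
    rw [PySem.Str.toList_strip, PySem.Str.toList_join, PySem.Str.toList_lstrip,
      PySem.Str.toList_join]
    have hparas : (if stB.2 ≠ [] then stB.1 ++ [PySem.Str.join "\n" stB.2]
        else stB.1).map String.toList
        = pvCloseB ((PySem.Chars.splitlines md.toList).foldl pvStepB ([], [])) := by
      by_cases h2 : stB.2 = []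
      · have : ((PySem.Chars.splitlines md.toList).foldl pvStepB ([], [])).2 = [] := by
          rw [← hB2, h2]; rfl
        simp [pvCloseB, h2, this, hB1]
      · have : ¬ ((PySem.Chars.splitlines md.toList).foldl pvStepB ([], [])).2 = [] := by
          rw [← hB2]; simpa using h2
        simp [pvCloseB, h2, this, PySem.Str.toList_join, hB1, hB2, pvJN]
    rw [hparas]
    have hJA : PySem.Chars.join "\n".toList (stA.1.map String.toList)
        = pvJN (((PySem.Chars.splitlines md.toList).foldl pvStepA ([], false)).1) := by
      rw [hA1]; rfl
    rw [hJA]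
    have hJ2 : PySem.Chars.join "\n\n".toList
        (pvCloseB ((PySem.Chars.splitlines md.toList).foldl pvStepB ([], [])))
        = pvJ2 (pvCloseB ((PySem.Chars.splitlines md.toList).foldl pvStepB ([], []))) := rfl
    rw [hJ2]
    exact hfin
  show (if PySem.Str.strip (PySem.Str.join "\n" stA.1) ≠ "" then
      PySem.Str.strip (PySem.Str.join "\n" stA.1) ++ "\n" else "")
    = (if PySem.Str.lstrip (PySem.Str.join "\n\n"
          (if stB.2 ≠ [] then stB.1 ++ [PySem.Str.join "\n" stB.2] else stB.1)) ≠ "" then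
        PySem.Str.lstrip (PySem.Str.join "\n\n"
          (if stB.2 ≠ [] then stB.1 ++ [PySem.Str.join "\n" stB.2] else stB.1)) ++ "\n" else "")
  rw [hkey]

theorem normalise_markdown_py_spec : Claim_equal_normalise_markdown_py := by
  intro md _
  unfold Spec_normalise_markdown_py
  exact pv_main md
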